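-- pv_equiv track=rewrite | github.com/rosepie/clowder-ai | vendor/dare-cli/scripts/ci/check_test_failure_ownership.py | _summary_nodeid
-- ===== SOURCE A (Python) =====
-- def _summary_nodeid(line: str, prefix: str) -> str | None:
--     """Extract the pytest summary nodeid portion from a FAILED/ERROR line."""
--     if not line.startswith(prefix):
--         return None
--     remainder = line[len(prefix) :]
--     if not remainder:
--         return None
--
--     bracket_depth = 0
--     for idx, char in enumerate(remainder):
--         if char == "[":
--             bracket_depth += 1
--             continue
--         if char == "]" and bracket_depth > 0:
--             bracket_depth -= 1
--             continue
--         if bracket_depth == 0 and remainder.startswith(" - ", idx):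
--             return remainder[:idx]
--     return remainder
-- ===== SOURCE B (Python) =====
-- def _summary_nodeid(line: str, prefix: str) -> str | None:
--     """Extract the pytest summary nodeid portion from a FAILED/ERROR line."""
--     if not line.startswith(prefix):
--         return None
--     remainder = line[len(prefix):]
--     if not remainder:
--         return None
--
--     start = 0
--     while True:
--         idx = remainder.find(" - ", start)
--         if idx == -1:
--             return remainder
--         depth = 0
--         for char in remainder[:idx]:
--             if char == "[":
--                 depth += 1
--             elif char == "]" and depth > 0:
--                 depth -= 1
--         if depth == 0:
--             return remainder[:idx]
--         start = idx + 1
-- ===== Notes on version B (the rewrite author's own statement) =====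
-- stated objective: alternative
-- what changed: A does one fused per-character scan carrying a running bracket depth and testing ' - ' at every index; B instead jumps between candidate delimiters with str.find(' - ', start) and recounts the clamped bracket balance of the prefix before each candidate, returning the first balanced one.
import Mathlib
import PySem

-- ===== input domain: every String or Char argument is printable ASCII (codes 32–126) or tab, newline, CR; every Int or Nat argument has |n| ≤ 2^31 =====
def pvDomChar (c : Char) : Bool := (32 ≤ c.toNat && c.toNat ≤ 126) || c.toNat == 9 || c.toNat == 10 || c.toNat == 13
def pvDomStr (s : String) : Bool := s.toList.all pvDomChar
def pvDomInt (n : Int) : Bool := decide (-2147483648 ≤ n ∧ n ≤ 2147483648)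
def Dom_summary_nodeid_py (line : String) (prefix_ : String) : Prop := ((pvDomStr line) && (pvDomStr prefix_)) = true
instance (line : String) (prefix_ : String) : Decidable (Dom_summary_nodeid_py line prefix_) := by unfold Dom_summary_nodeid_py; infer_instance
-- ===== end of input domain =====

-- B replaces A's fused character scan (running bracket depth + delimiter test at every index)
-- by a str.find-driven jump between " - " candidates, recounting the clamped bracket balance
-- of the prefix before each candidate; alternative decomposition, same results.


-- the delimiter " - " as a char list (shared constant)
def pvPat : List Char := [' ', '-', ' ']

-- ===== PORT A =====
-- A's single scan: idx, the running clamped bracket_depth, testing startswith(" - ", idx)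
-- (the current suffix is exactly remainder[idx:], so startswith(" - ", idx) = pvPat.isPrefixOf suffix)
def aLoop : List Char → Nat → Int → Option Nat
  | [], _, _ => none
  | c :: rest, idx, depth =>
    if c = '[' then aLoop rest (idx + 1) (depth + 1)
    else if c = ']' ∧ depth > 0 then aLoop rest (idx + 1) (depth - 1)
    else if depth = 0 ∧ pvPat.isPrefixOf (c :: rest) then some idx
    else aLoop rest (idx + 1) depth

def summary_nodeid_py (line : String) (prefix_ : String) : Option String :=
  if PySem.Str.startswith line prefix_ then
    -- line[len(prefix):] with a nonnegative index = drop (exact)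
    let remainder := line.toList.drop prefix_.toList.length
    if remainder = [] then none
    else
      match aLoop remainder 0 0 with
      | some idx => some (String.ofList (remainder.take idx))   -- remainder[:idx]
      | none => some (String.ofList remainder)
  else none

-- ===== PORT B =====
-- bracket balance of a prefix, clamped at zero (B's inner for-loop)
def bDepth (l : List Char) : Int :=
  l.foldl (fun d c => if c = '[' then d + 1 else if c = ']' ∧ d > 0 then d - 1 else d) 0

-- Source B's `while True` loop; fuel = remainder.length + 1 only makes the recursion total
-- (it is never exhausted: each iteration advances start past a found candidate)
def bLoop (rem : List Char) : Nat → Nat → Option Nat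
  | _, 0 => none
  | start, fuel + 1 =>
    let idx := PySem.Chars.findFrom rem pvPat (start : Int) none   -- remainder.find(" - ", start)
    if idx = -1 then none                                          -- "return remainder" at the wrapper
    else if bDepth (rem.take idx.toNat) = 0 then some idx.toNat    -- "return remainder[:idx]"
    else bLoop rem (idx.toNat + 1) fuel

def summary_nodeid_py_alt (line : String) (prefix_ : String) : Option String :=
  if PySem.Str.startswith line prefix_ then
    let remainder := line.toList.drop prefix_.toList.length
    if remainder = [] then none
    else
      match bLoop remainder 0 (remainder.length + 1) with
      | some idx => some (String.ofList (remainder.take idx))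
      | none => some (String.ofList remainder)
  else none

-- ===== PRECONDITION & SPEC =====
def Spec_summary_nodeid_py (line : String) (prefix_ : String) (out : Option String) : Prop := out = summary_nodeid_py_alt line prefix_
instance (line : String) (prefix_ : String) (out : Option String) : Decidable (Spec_summary_nodeid_py line prefix_ out) := by unfold Spec_summary_nodeid_py; infer_instance

-- ===== CLAIM (what is proved, stated in full; the proofs are below) =====
def Claim_equal_summary_nodeid_py : Prop := ∀ (line : String) (prefix_ : String), Dom_summary_nodeid_py line prefix_ → Spec_summary_nodeid_py line prefix_ (summary_nodeid_py line prefix_)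

-- ===== LEMMAS AND PROOFS =====

-- common specification loop: first index i with " - " prefixed at i and clamped balance 0
def goodAt (rem : List Char) (j : Nat) : Bool :=
  pvPat.isPrefixOf (rem.drop j) && (bDepth (rem.take j) == 0)

def specLoop (rem : List Char) (i : Nat) : Option Nat :=
  if _h : i < rem.length then
    (if goodAt rem i then some i else specLoop rem (i + 1))
  else none
termination_by rem.length - i

lemma specLoop_none (rem : List Char) (i : Nat) (h : ¬ i < rem.length) : specLoop rem i = none := by
  rw [specLoop]; simp [h]

lemma goodAt_true {rem : List Char} {m : Nat} (hp : pvPat <+: rem.drop m)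
    (hz : bDepth (rem.take m) = 0) : goodAt rem m = true := by
  unfold goodAt
  rw [Bool.and_eq_true, List.isPrefixOf_iff_prefix, beq_iff_eq]
  exact ⟨hp, hz⟩

lemma goodAt_false_of_not_prefix {rem : List Char} {m : Nat} (h : ¬ pvPat <+: rem.drop m) :
    goodAt rem m = false := by
  unfold goodAt
  rw [← Bool.not_eq_true, Bool.and_eq_true, List.isPrefixOf_iff_prefix]
  exact fun hc => h hc.1

lemma goodAt_false_of_depth {rem : List Char} {m : Nat} (h : ¬ bDepth (rem.take m) = 0) :
    goodAt rem m = false := by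
  unfold goodAt
  rw [← Bool.not_eq_true, Bool.and_eq_true, beq_iff_eq]
  exact fun hc => h hc.2

lemma bDepth_append_one (l : List Char) (c : Char) :
    bDepth (l ++ [c]) =
      (if c = '[' then bDepth l + 1 else if c = ']' ∧ bDepth l > 0 then bDepth l - 1 else bDepth l) := by
  simp [bDepth, List.foldl_append]

lemma lemA : ∀ (k : Nat) (rem : List Char) (i : Nat), rem.length - i ≤ k →
    aLoop (rem.drop i) i (bDepth (rem.take i)) = specLoop rem i := by
  intro k
  induction k with
  | zero =>
    intro rem i h
    have hi : rem.length ≤ i := by omega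
    rw [List.drop_eq_nil_of_le hi, specLoop_none rem i (by omega)]
    rfl
  | succ k ih =>
    intro rem i h
    by_cases hi : i < rem.length
    · have hdrop : rem.drop i = rem[i] :: rem.drop (i + 1) := List.drop_eq_getElem_cons hi
      have htake : rem.take (i + 1) = rem.take i ++ [rem[i]] := by
        rw [List.take_add_one]; simp [List.getElem?_eq_getElem hi]
      have hstep : bDepth (rem.take (i + 1)) =
          (if rem[i] = '[' then bDepth (rem.take i) + 1
           else if rem[i] = ']' ∧ bDepth (rem.take i) > 0 then bDepth (rem.take i) - 1
           else bDepth (rem.take i)) := by rw [htake, bDepth_append_one]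
      have hih : aLoop (rem.drop (i+1)) (i+1) (bDepth (rem.take (i+1))) = specLoop rem (i+1) :=
        ih rem (i+1) (by omega)
      rw [hdrop, specLoop]
      simp only [hi, dite_true]
      by_cases hc1 : rem[i] = '['
      · have hng : goodAt rem i = false := by
          apply goodAt_false_of_not_prefix
          rw [hdrop, hc1]
          intro hp
          rcases List.cons_prefix_cons.mp hp with ⟨he, -⟩
          exact absurd he (by decide)
        rw [aLoop, if_pos hc1, hng]
        simp only [Bool.false_eq_true, if_false]
        rw [← hih, hstep, if_pos hc1]
      · by_cases hc2 : rem[i] = ']' ∧ bDepth (rem.take i) > 0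
        · have hng : goodAt rem i = false := by
            apply goodAt_false_of_not_prefix
            rw [hdrop, hc2.1]
            intro hp
            rcases List.cons_prefix_cons.mp hp with ⟨he, -⟩
            exact absurd he (by decide)
          rw [aLoop, if_neg hc1, if_pos hc2, hng]
          simp only [Bool.false_eq_true, if_false]
          rw [← hih, hstep, if_neg hc1, if_pos hc2]
        · by_cases hc3 : bDepth (rem.take i) = 0 ∧ pvPat.isPrefixOf (rem[i] :: rem.drop (i+1)) = true
          · have hp : pvPat <+: rem.drop i := by
              rw [hdrop]; exact List.isPrefixOf_iff_prefix.mp hc3.2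
            have hg : goodAt rem i = true := goodAt_true hp hc3.1
            rw [aLoop, if_neg hc1, if_neg hc2, if_pos hc3, hg, if_pos rfl]
          · have hng : goodAt rem i = false := by
              rcases Decidable.not_and_iff_or_not.mp hc3 with h0 | h0
              · exact goodAt_false_of_depth h0
              · apply goodAt_false_of_not_prefix
                intro hp
                exact h0 (List.isPrefixOf_iff_prefix.mpr (hdrop ▸ hp))
            have heq : bDepth (rem.take (i+1)) = bDepth (rem.take i) := by
              rw [hstep, if_neg hc1, if_neg hc2]
            rw [aLoop, if_neg hc1, if_neg hc2, if_neg hc3, hng]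
            simp only [Bool.false_eq_true, if_false]
            rw [← heq]; exact hih
    · rw [List.drop_eq_nil_of_le (by omega), specLoop_none rem i hi]
      rfl

-- no good index in [i, j) → specLoop skips from i to j
lemma specLoop_skip : ∀ (d : Nat) (rem : List Char) (i j : Nat), j - i ≤ d → i ≤ j →
    (∀ m, i ≤ m → m < j → goodAt rem m = false) → specLoop rem i = specLoop rem j := by
  intro d
  induction d with
  | zero =>
    intro rem i j h hij _
    have he : i = j := by omega
    rw [he]
  | succ d ih =>
    intro rem i j h hij hng
    by_cases he : i = j
    · rw [he]
    · have hlt : i < j := by omega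
      by_cases hi : i < rem.length
      · rw [specLoop]
        simp only [hi, dite_true, hng i le_rfl hlt, Bool.false_eq_true, if_false]
        exact ih rem (i+1) j (by omega) (by omega) (fun m hm1 hm2 => hng m (by omega) hm2)
      · rw [specLoop_none rem i hi, specLoop_none rem j (by omega)]

lemma prefix_drop_not_infix {rem : List Char} {k j : Nat} (hk : k ≤ j)
    (hpre : pvPat <+: rem.drop j) : pvPat <:+: rem.drop k := by
  have heq : rem.drop j = (rem.drop k).drop (j - k) := by
    rw [List.drop_drop]; congr 1; omega
  rw [heq] at hpre
  exact hpre.isInfix.trans (List.drop_suffix _ _).isInfix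

lemma lemB : ∀ (fuel : Nat) (rem : List Char) (start : Nat), start ≤ rem.length →
    rem.length + 1 - start ≤ fuel → bLoop rem start fuel = specLoop rem start := by
  intro fuel
  induction fuel with
  | zero => intro rem start h1 h2; omega
  | succ fuel ih =>
    intro rem start h1 h2
    rw [bLoop]
    by_cases hneg : PySem.Chars.findFrom rem pvPat (start : Int) none = -1
    · simp only [hneg, if_true]
      -- no " - " at any index ≥ start: specLoop runs off the end
      have hninf : ¬ pvPat <:+: rem.drop start :=
        (PySem.Chars.findFrom_natCast_eq_neg_one_iff rem pvPat start h1).mp hneg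
      rw [specLoop_skip (rem.length - start) rem start rem.length (by omega) h1
            (fun m hm _ => goodAt_false_of_not_prefix
              (fun hpre => hninf (prefix_drop_not_infix hm hpre))),
          specLoop_none rem rem.length (by omega)]
    · obtain ⟨hge, hpre, hmin⟩ := PySem.Chars.findFrom_natCast_spec rem pvPat start h1 hneg
      set r := PySem.Chars.findFrom rem pvPat (start : Int) none with hr
      have hr0 : (0 : Int) ≤ r := le_trans (by exact_mod_cast Nat.zero_le start) hge
      have hstartle : start ≤ r.toNat := by omega
      have hrlt : r.toNat < rem.length := by
        by_contra hc
        have hnil : rem.drop r.toNat = [] := List.drop_eq_nil_of_le (by omega)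
        rw [hnil] at hpre
        have := hpre.length_le
        simp [pvPat] at this
      have hskip : specLoop rem start = specLoop rem r.toNat :=
        specLoop_skip (r.toNat - start) rem start r.toNat (by omega) hstartle
          (fun m hm1 hm2 => goodAt_false_of_not_prefix (hmin m hm1 hm2))
      by_cases hz : bDepth (rem.take r.toNat) = 0
      · simp only [hneg, if_false, hz, if_true]
        rw [hskip, specLoop]
        simp [hrlt, goodAt_true hpre hz]
      · simp only [hneg, if_false, hz]
        rw [hskip, specLoop]
        simp only [hrlt, dite_true, goodAt_false_of_depth hz, Bool.false_eq_true, if_false]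
        exact ih rem (r.toNat + 1) (by omega) (by omega)

-- ===== VERDICT (by name: the statement is the Claim_ definition above) =====
theorem summary_nodeid_py_spec : Claim_equal_summary_nodeid_py := by
  intro line prefix_ _
  unfold Spec_summary_nodeid_py summary_nodeid_py summary_nodeid_py_alt
  by_cases hs : PySem.Str.startswith line prefix_
  · simp only [hs, if_true]
    set rem := line.toList.drop prefix_.toList.length with hrem
    by_cases he : rem = []
    · simp [he]
    · simp only [he, if_false]
      have hA : aLoop rem 0 0 = specLoop rem 0 := by
        have h0 := lemA rem.length rem 0 (by omega)
        simpa [bDepth] using h0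
      have hB : bLoop rem 0 (rem.length + 1) = specLoop rem 0 :=
        lemB (rem.length + 1) rem 0 (by omega) (by omega)
      rw [hA, hB]
  · simp only [PySem.Str.startswith_eq] at hs
    simp [hs]
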